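-- pv_equiv track=rewrite | github.com/ntu213/Text-to-Brainfuck | src/converter.py | convert
-- ===== SOURCE A (Python) =====
-- def convert(src):
-- 	'''Convert a string into Brainfuck code'''
--
-- 	res = ""
-- 	arr = [0]
-- 	idx = 0
-- 	for c in src:
-- 		while arr[idx] != ord(c):
-- 			if arr[idx] - ord(c) < 0:
-- 				arr[idx] += 1
-- 				res += '+'
-- 			else:
-- 				arr[idx] -= 1
-- 				res += '-'
-- 		res+='.'
--
-- 	return res
-- ===== SOURCE B (Python) =====
-- def convert(src):
--     '''Convert a string into Brainfuck code'''
--     pieces = []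
--     cur = 0
--     for c in src:
--         d = ord(c) - cur
--         pieces.append(('+' * d if d >= 0 else '-' * (-d)) + '.')
--         cur = ord(c)
--     return ''.join(pieces)
-- ===== Notes on version B (the rewrite author's own statement) =====
-- stated objective: simpler
-- what changed: Replaces the cell array and the step-by-step while loop (one output character per unit change of the cell) by a single integer cursor and a closed-form run length delta = ord(c) - cur emitted via string repetition, with the pieces joined once at the end.
import Mathlib
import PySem

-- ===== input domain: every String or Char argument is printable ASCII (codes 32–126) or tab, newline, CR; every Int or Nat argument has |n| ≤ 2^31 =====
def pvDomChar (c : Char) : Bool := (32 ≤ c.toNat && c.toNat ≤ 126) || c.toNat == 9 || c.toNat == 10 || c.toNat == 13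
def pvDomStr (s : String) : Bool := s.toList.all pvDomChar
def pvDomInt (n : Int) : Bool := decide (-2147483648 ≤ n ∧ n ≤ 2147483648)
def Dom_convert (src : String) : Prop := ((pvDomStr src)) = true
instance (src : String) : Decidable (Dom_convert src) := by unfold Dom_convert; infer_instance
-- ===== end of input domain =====

-- B changes the algorithm: each '+'/'-' run is computed in closed form (ord(c) - cur) and emitted
-- by bulk repetition with one final join, instead of A's unit-step while loop over a cell array.
-- Strings are represented as List Char internally (String.append is kernel-opaque); String.mk at the end.

-- ===== PORT A =====
-- the while loop: arr[idx] stepped one unit at a time toward ord(c), emitting '+'/'-' per step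
def convertStepA (cur target : Int) (res : List Char) : List Char :=
  if cur = target then res
  else if cur - target < 0 then convertStepA (cur + 1) target (res ++ ['+'])
  else convertStepA (cur - 1) target (res ++ ['-'])
termination_by (target - cur).natAbs
decreasing_by all_goals omega

-- the for loop over src; arr = [0], idx = 0 throughout, so the single cell arr[idx] is `cur`
def convertGoA : List Char → Int → List Char → List Char
  | [], _, res => res
  | c :: cs, cur, res => convertGoA cs (c.toNat : Int) (convertStepA cur (c.toNat : Int) res ++ ['.'])

def convert (src : String) : String := String.mk (convertGoA src.toList 0 [])

-- ===== PORT B =====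
def convertFoldB (st : List (List Char) × Int) (c : Char) : List (List Char) × Int :=
  let d : Int := (c.toNat : Int) - st.2
  let piece : List Char :=
    (if 0 ≤ d then List.replicate d.toNat '+' else List.replicate (-d).toNat '-') ++ ['.']
  (st.1 ++ [piece], (c.toNat : Int))

def convert_alt (src : String) : String :=
  String.mk (PySem.Chars.join [] (src.toList.foldl convertFoldB ([], 0)).1)

-- ===== PRECONDITION & SPEC =====
def Spec_convert (src : String) (out : String) : Prop := out = convert_alt src
instance (src : String) (out : String) : Decidable (Spec_convert src out) := by unfold Spec_convert; infer_instance

-- ===== CLAIM (what is proved, stated in full; the proofs are below) =====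
def Claim_equal_convert : Prop := ∀ (src : String), Dom_convert src → Spec_convert src (convert src)

-- ===== LEMMAS AND PROOFS =====

lemma join_nil_eq_flatten (l : List (List Char)) : PySem.Chars.join [] l = l.flatten := by
  induction l with
  | nil => simp [PySem.Chars.join_nil]
  | cons a t ih =>
    cases t with
    | nil => simp [PySem.Chars.join_singleton]
    | cons b t' => rw [PySem.Chars.join_cons_cons, List.flatten_cons, ← ih]; simp

lemma convertStepA_eq (cur target : Int) (res : List Char) :
    convertStepA cur target res =
      res ++ (if 0 ≤ target - cur then List.replicate (target - cur).toNat '+'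
              else List.replicate (cur - target).toNat '-') := by
  by_cases h : cur = target
  · subst h; rw [convertStepA]; simp
  · by_cases hlt : cur - target < 0
    · rw [convertStepA, if_neg h, if_pos hlt, convertStepA_eq (cur + 1) target,
          if_pos (show (0:Int) ≤ target - (cur + 1) by omega),
          if_pos (show (0:Int) ≤ target - cur by omega),
          show (target - cur).toNat = (target - (cur + 1)).toNat + 1 by omega,
          List.replicate_succ]
      simp
    · by_cases he : cur = target + 1
      · rw [convertStepA, if_neg h, if_neg hlt, show cur - 1 = target by omega,
            convertStepA, if_pos rfl, if_neg (show ¬ (0:Int) ≤ target - cur by omega),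
            show (cur - target).toNat = 1 by omega]
        simp
      · rw [convertStepA, if_neg h, if_neg hlt, convertStepA_eq (cur - 1) target,
            if_neg (show ¬ (0:Int) ≤ target - (cur - 1) by omega),
            if_neg (show ¬ (0:Int) ≤ target - cur by omega),
            show (cur - target).toNat = (cur - 1 - target).toNat + 1 by omega,
            List.replicate_succ]
        simp
termination_by (target - cur).natAbs
decreasing_by all_goals omega

lemma foldB_shift (cs : List Char) (st : List (List Char) × Int) :
    (cs.foldl convertFoldB st).1 = st.1 ++ (cs.foldl convertFoldB ([], st.2)).1 := by
  induction cs generalizing st with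
  | nil => simp
  | cons c t ih =>
    simp only [List.foldl_cons]
    rw [ih (convertFoldB st c), ih (convertFoldB ([], st.2) c)]
    simp [convertFoldB, List.append_assoc]

lemma convertGoA_eq (cs : List Char) (cur : Int) (res : List Char) :
    convertGoA cs cur res = res ++ ((cs.foldl convertFoldB ([], cur)).1).flatten := by
  induction cs generalizing cur res with
  | nil => simp [convertGoA]
  | cons c t ih =>
    rw [convertGoA, ih, convertStepA_eq]
    simp only [List.foldl_cons]
    rw [foldB_shift t (convertFoldB ([], cur) c)]
    simp [convertFoldB, List.append_assoc, neg_sub]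

-- ===== VERDICT (by name: the statement is the Claim_ definition above) =====
theorem convert_spec : Claim_equal_convert := by
  intro src _
  unfold Spec_convert convert convert_alt
  rw [convertGoA_eq, join_nil_eq_flatten]
  simp
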